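-- pv_equiv track=rewrite | github.com/Health-First-Ravar/Purity-Research-Database | scripts/synthesize.py | group_by_product
-- ===== SOURCE A (Python) =====
-- from collections import defaultdict
--
-- def group_by_product(records: list[dict]) -> dict[str, list[dict]]:
--     groups: dict[str, list[dict]] = defaultdict(list)
--     for r in records:
--         key = r.get("product_key")
--         if not key or r.get("status") == "VOID":
--             continue
--         groups[key].append(r)
--     for k in groups:
--         groups[k].sort(key=lambda r: r.get("test_date") or "", reverse=True)
--     return groups
-- ===== SOURCE B (Python) =====
-- def group_by_product(records: list[dict]) -> dict[str, list[dict]]: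
--     kept = [r for r in records
--             if r.get("product_key") and r.get("status") != "VOID"]
--     groups: dict[str, list[dict]] = {r["product_key"]: [] for r in kept}
--     for r in sorted(kept, key=lambda r: r.get("test_date") or "", reverse=True):
--         groups[r["product_key"]].append(r)
--     return groups
-- ===== Notes on version B (the rewrite author's own statement) =====
-- stated objective: alternative
-- what changed: B filters once, does one global stable reverse sort by date and a single grouping pass into pre-seeded, first-appearance-ordered groups, instead of A's per-group in-place sorts after grouping.
import Mathlib
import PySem

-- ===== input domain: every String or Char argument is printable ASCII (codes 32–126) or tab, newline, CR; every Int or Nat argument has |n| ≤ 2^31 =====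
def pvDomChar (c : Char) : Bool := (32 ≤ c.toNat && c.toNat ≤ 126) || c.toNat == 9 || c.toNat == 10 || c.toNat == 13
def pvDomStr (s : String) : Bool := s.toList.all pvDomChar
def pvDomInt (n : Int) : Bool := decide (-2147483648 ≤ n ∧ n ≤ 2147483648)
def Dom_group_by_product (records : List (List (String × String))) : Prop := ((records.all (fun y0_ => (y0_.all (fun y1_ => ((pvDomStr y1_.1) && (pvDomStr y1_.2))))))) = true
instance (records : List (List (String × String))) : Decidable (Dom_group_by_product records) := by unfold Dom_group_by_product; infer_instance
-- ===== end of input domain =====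

-- B replaces A's per-group sorts by one global stable sort followed by a single grouping pass
-- (objective: alternative; same return value — A returns a defaultdict, B a plain dict, value-equal).


-- ===== PORT A =====
-- r.get(k) on a record (dicts are association lists under the type convention)
def pvGet (r : List (String × String)) (k : String) : Option String := (PySem.Dict.mk r).get? k

-- lambda r: r.get("test_date") or ""   (None -> "", and "" or "" is "")
def pvDate (r : List (String × String)) : String := (pvGet r "test_date").getD ""

def group_by_product (records : List (List (String × String))) : List (String × List (List (String × String))) :=
  let groups := records.foldl (fun (g : PySem.Dict String (List (List (String × String)))) r =>
    match pvGet r "product_key" with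
    | none => g                                   -- key is None: continue
    | some key =>
      if key == "" || pvGet r "status" == some "VOID" then g   -- not key or status == "VOID": continue
      else g.modify key [] (fun xs => xs ++ [r])) PySem.Dict.empty
  -- for k in groups: groups[k].sort(key=…, reverse=True); return groups
  groups.items.map (fun p => (p.1, PySem.List.sorted p.2 pvDate true))

-- ===== PORT B =====
-- the filter of B's first comprehension: r.get("product_key") truthy and status != "VOID"
def pvKeep (r : List (String × String)) : Bool :=
  match pvGet r "product_key" with
  | none => false
  | some key => !(key == "") && !(pvGet r "status" == some "VOID")

-- r["product_key"]; total form, only applied to kept records (key present there)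
def pvPK (r : List (String × String)) : String := (pvGet r "product_key").getD ""

def group_by_product_alt (records : List (List (String × String))) : List (String × List (List (String × String))) :=
  let kept := records.filter pvKeep
  let groups0 := kept.foldl
    (fun (g : PySem.Dict String (List (List (String × String)))) r => g.insert (pvPK r) []) PySem.Dict.empty
  let groups := (PySem.List.sorted kept pvDate true).foldl
    (fun g r => g.modify (pvPK r) [] (fun xs => xs ++ [r])) groups0
  groups.items

-- ===== PRECONDITION & SPEC =====
def Spec_group_by_product (records : List (List (String × String))) (out : List (String × List (List (String × String)))) : Prop := out = group_by_product_alt records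
instance (records : List (List (String × String))) (out : List (String × List (List (String × String)))) : Decidable (Spec_group_by_product records out) := by unfold Spec_group_by_product; infer_instance

-- ===== CLAIM (what is proved, stated in full; the proofs are below) =====
def Claim_equal_group_by_product : Prop := ∀ (records : List (List (String × String))), Dom_group_by_product records → Spec_group_by_product records (group_by_product records)

-- ===== LEMMAS AND PROOFS =====

-- a foldl whose step ignores the non-kept elements is a foldl over the filtered list
theorem foldl_filter_of_step {α β : Type} (f f' : β → α → β) (p : α → Bool)
    (h : ∀ g r, f g r = if p r then f' g r else g) :
    ∀ (l : List α) (g : β), l.foldl f g = (l.filter p).foldl f' g := by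
  intro l
  induction l with
  | nil => intro g; rfl
  | cons r t ih =>
    intro g
    by_cases hp : p r = true
    · simp [hp, h, ih]
    · simp [hp, h, ih]

-- A's loop body, expressed through B's record predicates
theorem stepA_eq (g : PySem.Dict String (List (List (String × String)))) (r : List (String × String)) :
    (match pvGet r "product_key" with
      | none => g
      | some key =>
        if key == "" || pvGet r "status" == some "VOID" then g
        else g.modify key [] (fun xs => xs ++ [r]))
    = if pvKeep r then g.modify (pvPK r) [] (fun xs => xs ++ [r]) else g := by
  rcases hg : pvGet r "product_key" with _ | key
  · simp [pvKeep, hg]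
  · by_cases h1 : key = ""
    · simp [pvKeep, hg, h1]
    · by_cases h2 : pvGet r "status" = some "VOID"
      · simp [pvKeep, hg, h2]
      · simp [pvKeep, pvPK, hg, h1, h2]


theorem insertBy_cons_pos {α : Type} (before : α → α → Bool) (x y : α) (ys : List α)
    (hb : before x y = true) :
    PySem.List.insertBy before x (y :: ys) = x :: y :: ys := by
  simp only [PySem.List.insertBy, hb, if_true]

theorem insertBy_cons_neg {α : Type} (before : α → α → Bool) (x y : α) (ys : List α)
    (hb : before x y = false) :
    PySem.List.insertBy before x (y :: ys) = y :: PySem.List.insertBy before x ys := by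
  simp only [PySem.List.insertBy, hb, Bool.false_eq_true, if_false]

theorem insertBy_cons_of_forall {α : Type} (before : α → α → Bool) (x : α) (l : List α)
    (h : ∀ z ∈ l, before x z = true) :
    PySem.List.insertBy before x l = x :: l := by
  cases l with
  | nil => rfl
  | cons y ys => exact insertBy_cons_pos before x y ys (h y (by simp))

theorem filter_insertBy {α : Type} (key : α → String) (p : α → Bool) (x : α) (ys : List α)
    (h : ys.Pairwise (fun a b => key b ≤ key a)) :
    (PySem.List.insertBy (fun a b => decide (key b < key a)) x ys).filter p
    = if p x then PySem.List.insertBy (fun a b => decide (key b < key a)) x (ys.filter p)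
      else ys.filter p := by
  induction ys with
  | nil => by_cases hp : p x = true <;> simp [PySem.List.insertBy, hp]
  | cons y ys ih =>
    have hhead : ∀ z ∈ ys, key z ≤ key y := fun z hz => List.rel_of_pairwise_cons h hz
    have htail : ys.Pairwise (fun a b => key b ≤ key a) := (List.pairwise_cons.mp h).2
    by_cases hb : key y < key x
    · rw [insertBy_cons_pos _ x y ys (by simpa using hb)]
      by_cases hp : p x = true
      · rw [if_pos hp, List.filter_cons, if_pos hp]
        rw [insertBy_cons_of_forall]
        intro z hz
        have hz' : z ∈ y :: ys := List.mem_of_mem_filter hz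
        have hle : key z ≤ key y := by
          rcases List.mem_cons.mp hz' with h' | h'
          · exact le_of_eq (by rw [h'])
          · exact hhead z h'
        simpa using lt_of_le_of_lt hle hb
      · rw [if_neg hp, List.filter_cons, if_neg hp]
    · rw [insertBy_cons_neg _ x y ys (by simpa using hb)]
      by_cases hp : p x = true
      · by_cases hpy : p y = true
        · rw [List.filter_cons, if_pos hpy, List.filter_cons, if_pos hpy, if_pos hp, ih htail,
            if_pos hp, insertBy_cons_neg _ x y _ (by simpa using hb)]
        · rw [List.filter_cons, if_neg hpy, List.filter_cons, if_neg hpy, if_pos hp, ih htail, if_pos hp]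
      · rw [List.filter_cons, List.filter_cons, ih htail, if_neg hp, if_neg hp]

theorem filter_sorted_rev {α : Type} (key : α → String) (p : α → Bool) (xs : List α) :
    (PySem.List.sorted xs key true).filter p = PySem.List.sorted (xs.filter p) key true := by
  induction xs using List.reverseRecOn with
  | nil => rfl
  | append_singleton xs x ih =>
    have h1 : ∀ (l : List α), PySem.List.sorted (l ++ [x]) key true
        = PySem.List.insertBy (fun a b => decide (key b < key a)) x (PySem.List.sorted l key true) := by
      intro l
      rw [PySem.List.sorted_rev_eq_foldl_insertBy, List.foldl_append, List.foldl_cons, List.foldl_nil,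
        ← PySem.List.sorted_rev_eq_foldl_insertBy]
    rw [h1, filter_insertBy key p x _ (PySem.List.sorted_pairwise_rev xs key), List.filter_append]
    by_cases hp : p x = true
    · rw [if_pos hp, ih, show List.filter p [x] = [x] by simp [hp], h1]
    · rw [if_neg hp, ih, show List.filter p [x] = [] by simp [hp], List.append_nil]

abbrev Rec := List (String × String)
abbrev GD := PySem.Dict String (List Rec)

theorem getD_groups0 (l : List Rec) (d : GD) (k : String) (h : d.getD k [] = []) :
    (l.foldl (fun g r => g.insert (pvPK r) []) d).getD k [] = [] := by
  induction l generalizing d with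
  | nil => exact h
  | cons r t ih =>
    simp only [List.foldl_cons]
    exact ih _ (by rw [PySem.Dict.getD_insert]; split <;> simp [h])

theorem getD_group_loop (l : List Rec) (d : GD) (k : String) :
    (l.foldl (fun g r => g.modify (pvPK r) [] (fun xs => xs ++ [r])) d).getD k []
    = d.getD k [] ++ l.filter (fun r => pvPK r == k) := by
  have h := PySem.Dict.getD_foldl_modify_append (l.map (fun r => (pvPK r, r))) d k
  rw [List.foldl_map] at h
  simpa [List.filter_map, Function.comp_def] using h

theorem main (records : List Rec) :
    (((records.filter pvKeep).foldl (fun (g : GD) r => g.modify (pvPK r) [] (fun xs => xs ++ [r]))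
        PySem.Dict.empty).items).map (fun p => (p.1, PySem.List.sorted p.2 pvDate true))
    = ((PySem.List.sorted (records.filter pvKeep) pvDate true).foldl
        (fun (g : GD) r => g.modify (pvPK r) [] (fun xs => xs ++ [r]))
        ((records.filter pvKeep).foldl (fun (g : GD) r => g.insert (pvPK r) []) PySem.Dict.empty)).items := by
  set kept := records.filter pvKeep with hkept
  set skept := PySem.List.sorted kept pvDate true with hskept
  set K : List String := PySem.Set.ofList (kept.map pvPK) with hK
  set groups0 : GD := kept.foldl (fun (g : GD) r => g.insert (pvPK r) []) PySem.Dict.empty with hg0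
  set dA : GD := kept.foldl (fun (g : GD) r => g.modify (pvPK r) [] (fun xs => xs ++ [r])) PySem.Dict.empty with hdA
  set dB : GD := skept.foldl (fun (g : GD) r => g.modify (pvPK r) [] (fun xs => xs ++ [r])) groups0 with hdB
  have hAkeys : dA.keys = K := by
    rw [hdA, PySem.Dict.keys_foldl_modify_key kept pvPK [] (fun _ r => fun xs => xs ++ [r]) PySem.Dict.empty,
      PySem.Dict.keys_empty, PySem.Set.update_nil_left]
  have hAnodup : dA.keys.Nodup := by
    rw [hdA]
    exact PySem.Dict.nodup_keys_foldl_modify_key kept pvPK [] _ PySem.Dict.empty (by simp [PySem.Dict.keys_empty])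
  have hg0keys : groups0.keys = K := by
    rw [hg0, PySem.Dict.keys_foldl_insert_key kept pvPK (fun _ _ => []) PySem.Dict.empty,
      PySem.Dict.keys_empty, PySem.Set.update_nil_left]
  have hg0nodup : groups0.keys.Nodup := by
    rw [hg0]
    exact PySem.Dict.nodup_keys_foldl_insert_key kept pvPK _ PySem.Dict.empty (by simp [PySem.Dict.keys_empty])
  have hBkeys : dB.keys = K := by
    rw [hdB, PySem.Dict.keys_foldl_modify_key skept pvPK [] (fun _ r => fun xs => xs ++ [r]) groups0, hg0keys]
    rw [PySem.Set.update_eq_append_filter]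
    have : (PySem.Set.ofList (skept.map pvPK)).filter (fun y => !(PySem.Set.contains K y)) = [] := by
      rw [List.filter_eq_nil_iff]
      intro y hy
      have : y ∈ skept.map pvPK := (PySem.Set.mem_ofList _ _).mp hy
      rcases List.mem_map.mp this with ⟨r, hr, rfl⟩
      have hrk : r ∈ kept := (PySem.List.mem_sorted kept pvDate true (x := r)).mp hr
      have : pvPK r ∈ K := (PySem.Set.mem_ofList _ _).mpr (List.mem_map_of_mem hrk)
      simpa using this
    rw [this, List.append_nil]
  have hBnodup : dB.keys.Nodup := by
    rw [hdB]
    exact PySem.Dict.nodup_keys_foldl_modify_key skept pvPK [] _ groups0 hg0nodup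
  have hAitems := PySem.Dict.items_eq_map_keys dA hAnodup []
  have hBitems := PySem.Dict.items_eq_map_keys dB hBnodup []
  rw [hAitems, hBitems, hAkeys, hBkeys, List.map_map]
  apply List.map_congr_left
  intro k _
  have hAval : dA.getD k [] = kept.filter (fun r => pvPK r == k) := by
    rw [hdA, getD_group_loop, PySem.Dict.getD_empty, List.nil_append]
  have hBval : dB.getD k [] = skept.filter (fun r => pvPK r == k) := by
    rw [hdB, getD_group_loop, hg0, getD_groups0 _ _ _ (PySem.Dict.getD_empty _ _), List.nil_append]
  simp only [Function.comp_def, hAval, hBval, hskept]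
  rw [filter_sorted_rev]

-- ===== VERDICT (by name: the statement is the Claim_ definition above) =====
theorem group_by_product_spec : Claim_equal_group_by_product := by
  unfold Claim_equal_group_by_product Spec_group_by_product
  intro records _
  simp only [group_by_product, group_by_product_alt]
  rw [foldl_filter_of_step _ (fun g r => g.modify (pvPK r) [] (fun xs => xs ++ [r])) pvKeep stepA_eq]
  exact main records
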